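-- pv_equiv track=rewrite | github.com/loning/mbook-binary | src/binaryuniverse/tests/test_T0_7.py | check_coverage_completeness
-- ===== SOURCE A (Python) =====
-- from typing import List, Tuple, Set, Optional
--
-- def check_coverage_completeness(weights: List[int], max_val: int) -> Tuple[bool, List[int]]:
--     """Check if weights provide complete coverage up to max_val."""
--     # Generate all valid no-11 representations
--     covered = set()
--
--     def generate_values(pos: int, current_val: int, last_was_one: bool):
--         """Recursively generate all representable values."""
--         if pos >= len(weights):
--             covered.add(current_val)
--             return
--
--         # Option 1: Don't use this position (bit = 0)
--         generate_values(pos + 1, current_val, False)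
--
--         # Option 2: Use this position (bit = 1) if allowed
--         if not last_was_one:
--             generate_values(pos + 1, current_val + weights[pos], True)
--
--     generate_values(0, 0, False)
--
--     # Check for gaps
--     gaps = []
--     for i in range(1, max_val + 1):
--         if i not in covered:
--             gaps.append(i)
--
--     return len(gaps) == 0, gaps
-- ===== SOURCE B (Python) =====
-- def check_coverage_completeness(weights, max_val):
--     """Check if weights provide complete coverage up to max_val.
--
--     Iterative set DP over positions: `free` holds sums of no-11 subsets of the
--     prefix whose last position is unused, `used` those whose last position is used.
--     """
--     free, used = {0}, set()
--     for w in weights: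
--         free, used = free | used, {v + w for v in free}
--     covered = free | used
--     gaps = [i for i in range(1, max_val + 1) if i not in covered]
--     return not gaps, gaps
-- ===== Notes on version B (the rewrite author's own statement) =====
-- stated objective: alternative
-- what changed: Replaced the exponential recursion over all no-11 bit choices by an iterative forward DP that keeps two deduplicated sets of reachable sums (last position used / unused), folding once over the weights; intended as faster (A timed out at n=64 where B returned; at the largest size both finished the probe read 1.49x, below the confirmation threshold), so no unqualified speed claim is made.
import Mathlib
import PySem

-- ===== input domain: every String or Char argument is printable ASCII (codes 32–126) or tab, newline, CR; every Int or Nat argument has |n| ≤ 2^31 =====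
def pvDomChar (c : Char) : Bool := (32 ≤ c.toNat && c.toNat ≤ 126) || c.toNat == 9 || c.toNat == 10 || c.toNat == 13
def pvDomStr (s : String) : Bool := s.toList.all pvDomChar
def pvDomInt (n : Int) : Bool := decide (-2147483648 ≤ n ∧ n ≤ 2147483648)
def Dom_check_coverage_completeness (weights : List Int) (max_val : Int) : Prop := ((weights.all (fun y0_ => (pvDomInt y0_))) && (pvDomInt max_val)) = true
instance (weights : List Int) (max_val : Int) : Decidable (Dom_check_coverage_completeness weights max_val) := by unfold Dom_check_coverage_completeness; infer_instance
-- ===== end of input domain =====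

-- B replaces A's exponential recursion over all no-11 bit choices by a forward set DP
-- over the weights (alternative algorithm; same return value on every input).

-- ===== PORT A =====
-- generate_values(pos, current_val, last_was_one): recursion over the suffix weights[pos:]
def pvGenA : List Int → Int → Bool → PySem.Set Int → PySem.Set Int
  | [], cur, _, covered => PySem.Set.add covered cur
  | w :: rest, cur, last, covered =>
      -- Option 1: bit = 0
      let covered := pvGenA rest cur false covered
      -- Option 2: bit = 1 if allowed
      if !last then pvGenA rest (cur + w) true covered else covered

def check_coverage_completeness (weights : List Int) (max_val : Int) : Bool × List Int :=
  let covered := pvGenA weights 0 false PySem.Set.empty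
  let gaps := (PySem.List.pyRange 1 (max_val + 1) 1).foldl
      (fun gs i => if !(PySem.Set.contains covered i) then gs ++ [i] else gs) []
  (gaps.length == 0, gaps)

-- ===== PORT B =====
def check_coverage_completeness_alt (weights : List Int) (max_val : Int) : Bool × List Int :=
  let fu := weights.foldl
      (fun (p : PySem.Set Int × PySem.Set Int) w =>
        (PySem.Set.union p.1 p.2, PySem.Set.ofList (p.1.map (fun v => v + w))))
      (PySem.Set.ofList [0], PySem.Set.empty)
  let covered := PySem.Set.union fu.1 fu.2
  let gaps := (PySem.List.pyRange 1 (max_val + 1) 1).filter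
      (fun i => !(PySem.Set.contains covered i))
  (gaps.isEmpty, gaps)

-- ===== PRECONDITION & SPEC =====
def Spec_check_coverage_completeness (weights : List Int) (max_val : Int) (out : Bool × List Int) : Prop := out = check_coverage_completeness_alt weights max_val
instance (weights : List Int) (max_val : Int) (out : Bool × List Int) : Decidable (Spec_check_coverage_completeness weights max_val out) := by unfold Spec_check_coverage_completeness; infer_instance

-- ===== CLAIM (what is proved, stated in full; the proofs are below) =====
def Claim_equal_check_coverage_completeness : Prop := ∀ (weights : List Int) (max_val : Int), Dom_check_coverage_completeness weights max_val → Spec_check_coverage_completeness weights max_val (check_coverage_completeness weights max_val)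

-- ===== LEMMAS AND PROOFS =====

-- The no-11 subset sums of a weight list; `last = true` forbids using the first position.
def pvNA : List Int → Bool → Int → Prop
  | [], _, x => x = 0
  | w :: r, last, x => pvNA r false x ∨ (last = false ∧ ∃ y, pvNA r true y ∧ x = w + y)

theorem pvGenA_mem (ws : List Int) : ∀ (cur : Int) (last : Bool) (acc : PySem.Set Int) (x : Int),
    x ∈ pvGenA ws cur last acc ↔ x ∈ acc ∨ ∃ y, pvNA ws last y ∧ x = cur + y := by
  induction ws with
  | nil =>
      intro cur last acc x
      simp [pvGenA, pvNA, PySem.Set.mem_add]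
  | cons w r ih =>
      intro cur last acc x
      cases last with
      | true =>
          simp only [pvGenA, Bool.not_true, Bool.false_eq_true, if_false]
          rw [ih]
          simp [pvNA]
      | false =>
          simp only [pvGenA, Bool.not_false, if_true]
          rw [ih, ih]
          simp only [pvNA, true_and]
          constructor
          · rintro ((h | ⟨y, hy, rfl⟩) | ⟨y, hy, rfl⟩)
            · exact Or.inl h
            · exact Or.inr ⟨y, Or.inl hy, rfl⟩
            · exact Or.inr ⟨w + y, Or.inr ⟨y, hy, rfl⟩, by ring⟩
          · rintro (h | ⟨y, (hy | ⟨z, hz, rfl⟩), rfl⟩)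
            · exact Or.inl (Or.inl h)
            · exact Or.inl (Or.inr ⟨y, hy, rfl⟩)
            · exact Or.inr ⟨z, hz, by ring⟩

-- One step of B's fold.
def pvStepB (p : PySem.Set Int × PySem.Set Int) (w : Int) : PySem.Set Int × PySem.Set Int :=
  (PySem.Set.union p.1 p.2, PySem.Set.ofList (p.1.map (fun v => v + w)))

theorem pvFoldB_mem (l : List Int) : ∀ (s0 s1 : PySem.Set Int) (x : Int),
    (x ∈ (l.foldl pvStepB (s0, s1)).1 ∨ x ∈ (l.foldl pvStepB (s0, s1)).2) ↔
      ((∃ a, a ∈ s0 ∧ ∃ y, pvNA l false y ∧ x = a + y) ∨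
       (∃ a, a ∈ s1 ∧ ∃ y, pvNA l true y ∧ x = a + y)) := by
  induction l with
  | nil =>
      intro s0 s1 x
      simp [pvNA, List.foldl]
  | cons w r ih =>
      intro s0 s1 x
      simp only [List.foldl_cons]
      rw [show pvStepB (s0, s1) w = (PySem.Set.union s0 s1, PySem.Set.ofList (s0.map (fun v => v + w))) from rfl]
      rw [ih]
      simp only [pvNA, true_and, Bool.true_eq_false, false_and, or_false]
      constructor
      · rintro (⟨a, ha, y, hy, rfl⟩ | ⟨a, ha, y, hy, rfl⟩)
        · rw [PySem.Set.mem_union] at ha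
          rcases ha with ha | ha
          · exact Or.inl ⟨a, ha, y, Or.inl hy, rfl⟩
          · exact Or.inr ⟨a, ha, y, hy, rfl⟩
        · rw [PySem.Set.mem_ofList, List.mem_map] at ha
          obtain ⟨b, hb, rfl⟩ := ha
          exact Or.inl ⟨b, hb, w + y, Or.inr ⟨y, hy, rfl⟩, by ring⟩
      · rintro (⟨a, ha, y, (hy | ⟨z, hz, rfl⟩), rfl⟩ | ⟨a, ha, y, hy, rfl⟩)
        · exact Or.inl ⟨a, by rw [PySem.Set.mem_union]; exact Or.inl ha, y, hy, rfl⟩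
        · refine Or.inr ⟨a + w, ?_, z, hz, by ring⟩
          rw [PySem.Set.mem_ofList, List.mem_map]
          exact ⟨a, ha, rfl⟩
        · exact Or.inl ⟨a, by rw [PySem.Set.mem_union]; exact Or.inr ha, y, hy, rfl⟩

theorem pvCovered_iff (weights : List Int) (x : Int) :
    x ∈ pvGenA weights 0 false PySem.Set.empty ↔
      (x ∈ (weights.foldl pvStepB (PySem.Set.ofList [0], PySem.Set.empty)).1 ∨
       x ∈ (weights.foldl pvStepB (PySem.Set.ofList [0], PySem.Set.empty)).2) := by
  rw [pvGenA_mem, pvFoldB_mem]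
  constructor
  · rintro (h | ⟨y, hy, rfl⟩)
    · exact absurd h (by simp [PySem.Set.empty])
    · exact Or.inl ⟨0, by simp [PySem.Set.mem_ofList], y, hy, by ring⟩
  · rintro (⟨a, ha, y, hy, rfl⟩ | ⟨a, ha, y, hy, rfl⟩)
    · rw [PySem.Set.mem_ofList] at ha
      simp only [List.mem_singleton] at ha
      subst ha
      exact Or.inr ⟨y, hy, by ring⟩
    · exact absurd ha (by simp [PySem.Set.empty])

-- ===== VERDICT (by name: the statement is the Claim_ definition above) =====
theorem check_coverage_completeness_spec : Claim_equal_check_coverage_completeness := by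
  intro weights max_val _
  unfold Spec_check_coverage_completeness check_coverage_completeness check_coverage_completeness_alt
  have hstep : (fun (p : PySem.Set Int × PySem.Set Int) w =>
      (PySem.Set.union p.1 p.2, PySem.Set.ofList (p.1.map (fun v => v + w)))) = pvStepB := rfl
  rw [hstep]
  have hcont : ∀ i : Int,
      PySem.Set.contains (pvGenA weights 0 false PySem.Set.empty) i =
      PySem.Set.contains
        (PySem.Set.union (weights.foldl pvStepB (PySem.Set.ofList [0], PySem.Set.empty)).1
          (weights.foldl pvStepB (PySem.Set.ofList [0], PySem.Set.empty)).2) i := by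
    intro i
    rw [Bool.eq_iff_iff, PySem.Set.contains_iff, PySem.Set.contains_iff, PySem.Set.mem_union]
    exact pvCovered_iff weights i
  simp only [PySem.List.foldl_append_if_eq_filter, List.nil_append]
  rw [List.filter_congr (fun i _ => by rw [hcont i])]
  cases ((PySem.List.pyRange 1 (max_val + 1) 1).filter
      (fun i => !(PySem.Set.contains
        (PySem.Set.union (weights.foldl pvStepB (PySem.Set.ofList [0], PySem.Set.empty)).1
          (weights.foldl pvStepB (PySem.Set.ofList [0], PySem.Set.empty)).2) i))) <;> rfl
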